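-- pv_equiv track=rewrite | github.com/FZ920722/FT-DAG | Experiment/__FT_DAG.py | number_combine
-- ===== SOURCE A (Python) =====
-- def number_combine(_NNum: int, _LRange: tuple, _SRange: tuple):
--     """ 基于NNUM的组合穷举 """
--     if 1 <= _LRange[0] <= _LRange[1] and 1 <= _SRange[0] <= _SRange[1] and _SRange[0] * _LRange[0] <= _NNum <= _SRange[1] * _LRange[1]:
--         for __gxn in range(max(1, _SRange[0]), min(_SRange[1], _NNum - (_LRange[0] - 1) * _SRange[0]) + 1):
--             __grn = _NNum - __gxn
--             if __grn == 0:
--                 yield (__gxn, )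
--             else:
--                 for __sub_comb in number_combine(__grn, (max(_LRange[0] - 1, 1), _LRange[1] - 1), (__gxn, _SRange[1])):
--                     yield __sub_comb + (__gxn, )
-- ===== SOURCE B (Python) =====
-- def number_combine(_NNum, _LRange, _SRange):
--     # Iterative DFS with an explicit stack; entries are ("Y", tuple) to emit
--     # or ("F", remaining, LRange, SRange, suffix) to expand.  Children are
--     # pushed in descending head order so they pop in ascending order.
--     stack = [("F", _NNum, _LRange, _SRange, ())]
--     while stack:
--         entry = stack.pop()
--         if entry[0] == "Y":
--             yield entry[1]
--             continue
--         _, n, (l0, l1), (s0, s1), suf = entry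
--         if not (1 <= l0 <= l1 and 1 <= s0 <= s1 and s0 * l0 <= n <= s1 * l1):
--             continue
--         for g in reversed(range(max(1, s0), min(s1, n - (l0 - 1) * s0) + 1)):
--             if g == n:
--                 stack.append(("Y", (g,) + suf))
--             else:
--                 stack.append(("F", n - g, (max(l0 - 1, 1), l1 - 1), (g, s1), (g,) + suf))
-- ===== Notes on version B (the rewrite author's own statement) =====
-- stated objective: alternative
-- what changed: Replaced the recursive generator with an iterative depth-first search driven by an explicit stack of frames (remaining sum, length range, size range, accumulated suffix), pushing candidate heads in reverse so emission order matches the recursion exactly.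
import Mathlib
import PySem

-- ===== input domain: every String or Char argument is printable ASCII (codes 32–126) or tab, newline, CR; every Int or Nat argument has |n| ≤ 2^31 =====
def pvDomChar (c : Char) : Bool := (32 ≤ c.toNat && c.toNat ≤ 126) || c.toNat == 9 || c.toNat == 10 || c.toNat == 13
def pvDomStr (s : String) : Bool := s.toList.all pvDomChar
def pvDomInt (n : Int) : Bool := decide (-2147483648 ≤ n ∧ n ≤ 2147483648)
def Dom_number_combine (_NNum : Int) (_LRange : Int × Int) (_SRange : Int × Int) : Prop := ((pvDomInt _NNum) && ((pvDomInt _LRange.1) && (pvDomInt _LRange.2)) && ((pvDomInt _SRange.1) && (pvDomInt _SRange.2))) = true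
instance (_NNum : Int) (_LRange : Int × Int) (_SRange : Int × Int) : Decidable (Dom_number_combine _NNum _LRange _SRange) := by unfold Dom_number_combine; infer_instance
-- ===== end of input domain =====

-- B replaces A's recursive generator by an iterative explicit-stack DFS (alternative decomposition, same output stream).

-- ===== PORT A =====
-- literal port of the recursive generator (list of yields, in order)
def number_combine (_NNum : Int) (_LRange : Int × Int) (_SRange : Int × Int) : List (List Int) :=
  if h : 1 ≤ _LRange.1 ∧ _LRange.1 ≤ _LRange.2 ∧ 1 ≤ _SRange.1 ∧ _SRange.1 ≤ _SRange.2 ∧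
         _SRange.1 * _LRange.1 ≤ _NNum ∧ _NNum ≤ _SRange.2 * _LRange.2 then
    (PySem.List.pyRange (max 1 _SRange.1) (min _SRange.2 (_NNum - (_LRange.1 - 1) * _SRange.1) + 1) 1).attach.flatMap
      (fun g =>
        if _NNum - g.1 = 0 then [[g.1]]
        else (number_combine (_NNum - g.1) (max (_LRange.1 - 1) 1, _LRange.2 - 1) (g.1, _SRange.2)).map
               (fun c => c ++ [g.1]))
  else []
termination_by _NNum.toNat
decreasing_by
  have hg := PySem.List.mem_pyRange_one.mp g.2
  have h2 : 0 < _SRange.1 * _LRange.1 := mul_pos (by omega) (by omega)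
  omega

-- ===== PORT B =====
-- stack entries: yld = an emit marker carrying the complete tuple; frame = (remaining, L-range, S-range, suffix)
inductive NCEntry where
  | yld : List Int → NCEntry
  | frame : Int → Int → Int → Int → Int → List Int → NCEntry
deriving DecidableEq, Repr

-- push one candidate head g onto the stack (body of B's for-loop over reversed heads)
def ncPush (n l0 l1 s1 : Int) (suf : List Int) (st : List NCEntry) (g : Int) : List NCEntry :=
  (if g = n then NCEntry.yld (g :: suf)
   else NCEntry.frame (n - g) (max (l0 - 1) 1) (l1 - 1) g s1 (g :: suf)) :: st

-- the while-loop; the fuel argument only makes the loop total, it is never exhausted (proved below)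
def ncLoop : Nat → List NCEntry → List (List Int)
  | 0, _ => []
  | _ + 1, [] => []
  | f + 1, NCEntry.yld t :: rest => t :: ncLoop f rest
  | f + 1, NCEntry.frame n l0 l1 s0 s1 suf :: rest =>
    if 1 ≤ l0 ∧ l0 ≤ l1 ∧ 1 ≤ s0 ∧ s0 ≤ s1 ∧ s0 * l0 ≤ n ∧ n ≤ s1 * l1 then
      ncLoop f ((PySem.List.pyRange (max 1 s0) (min s1 (n - (l0 - 1) * s0) + 1) 1).reverse.foldl
                  (ncPush n l0 l1 s1 suf) rest)
    else ncLoop f rest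

def number_combine_alt (_NNum : Int) (_LRange : Int × Int) (_SRange : Int × Int) : List (List Int) :=
  ncLoop (2 ^ (_NNum.toNat + 1)) [NCEntry.frame _NNum _LRange.1 _LRange.2 _SRange.1 _SRange.2 []]

-- ===== PRECONDITION & SPEC =====
def Spec_number_combine (_NNum : Int) (_LRange : Int × Int) (_SRange : Int × Int) (out : List (List Int)) : Prop := out = number_combine_alt _NNum _LRange _SRange
instance (_NNum : Int) (_LRange : Int × Int) (_SRange : Int × Int) (out : List (List Int)) : Decidable (Spec_number_combine _NNum _LRange _SRange out) := by unfold Spec_number_combine; infer_instance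

-- ===== CLAIM (what is proved, stated in full; the proofs are below) =====
def Claim_equal_number_combine : Prop := ∀ (_NNum : Int) (_LRange : Int × Int) (_SRange : Int × Int), Dom_number_combine _NNum _LRange _SRange → Spec_number_combine _NNum _LRange _SRange (number_combine _NNum _LRange _SRange)

-- ===== LEMMAS AND PROOFS =====

-- the entry pushed for head g
def ncChild (n l0 l1 s1 : Int) (suf : List Int) (g : Int) : NCEntry :=
  if g = n then NCEntry.yld (g :: suf)
  else NCEntry.frame (n - g) (max (l0 - 1) 1) (l1 - 1) g s1 (g :: suf)

-- weight of an entry / of a stack (termination measure for the while-loop)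
def ncW : NCEntry → Nat
  | .yld _ => 1
  | .frame n _ _ _ _ _ => 2 ^ (n.toNat + 1)

def ncM (st : List NCEntry) : Nat := (st.map ncW).sum

-- what the rest of the run owes for one entry
def ncEval : NCEntry → List (List Int)
  | .yld t => [t]
  | .frame n l0 l1 s0 s1 suf => (number_combine n (l0, l1) (s0, s1)).map (fun c => c ++ suf)

lemma ncW_pos (e : NCEntry) : 1 ≤ ncW e := by
  cases e with
  | yld t => simp [ncW]
  | frame n l0 l1 s0 s1 suf => exact Nat.one_le_two_pow

lemma ncM_append (a b : List NCEntry) : ncM (a ++ b) = ncM a + ncM b := by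
  simp [ncM]

lemma foldl_push (n l0 l1 s1 : Int) (suf : List Int) :
    ∀ (l : List Int) (rest : List NCEntry),
      l.reverse.foldl (ncPush n l0 l1 s1 suf) rest = l.map (ncChild n l0 l1 s1 suf) ++ rest := by
  intro l
  induction l with
  | nil => intro rest; rfl
  | cons a l ih =>
      intro rest
      simp only [List.reverse_cons, List.foldl_append, ih, List.foldl_cons, List.foldl_nil,
        ncPush, ncChild, List.map_cons, List.cons_append]

lemma sumW_bound (n l0 l1 s1 : Int) (suf : List Int) :
    ∀ (k : Nat) (lo b : Int), 1 ≤ lo → b ≤ n + 1 → (b - lo).toNat = k →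
      ncM ((PySem.List.pyRange lo b 1).map (ncChild n l0 l1 s1 suf)) ≤ 2 ^ ((n + 1 - lo).toNat + 1) - 2 := by
  intro k
  induction k with
  | zero =>
      intro lo b hlo hb hk
      rw [PySem.List.pyRange_one_eq_nil (by omega)]
      simp [ncM]
  | succ k ih =>
      intro lo b hlo hb hk
      rw [PySem.List.pyRange_one_cons (by omega)]
      have hlon : lo ≤ n := by omega
      have hrest := ih (lo + 1) b (by omega) hb (by omega)
      have hw : ncW (ncChild n l0 l1 s1 suf lo) ≤ 2 ^ ((n - lo).toNat + 1) := by
        by_cases hln : lo = n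
        · simp [ncChild, hln, ncW]
        · simp [ncChild, hln, ncW]
      have hexp : (n + 1 - lo).toNat = (n - lo).toNat + 1 := by omega
      have hexp2 : (n + 1 - (lo + 1)).toNat = (n - lo).toNat := by omega
      rw [hexp2] at hrest
      have hpow : 2 ^ ((n + 1 - lo).toNat + 1) = 2 ^ ((n - lo).toNat + 1) + 2 ^ ((n - lo).toNat + 1) := by
        rw [hexp]; ring
      have hmadd : ncM ((lo :: PySem.List.pyRange (lo + 1) b 1).map (ncChild n l0 l1 s1 suf)) =
          ncW (ncChild n l0 l1 s1 suf lo) +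
          ncM ((PySem.List.pyRange (lo + 1) b 1).map (ncChild n l0 l1 s1 suf)) := by
        simp [ncM]
      rw [hmadd]
      have h2 : (1:Nat) ≤ 2 ^ ((n - lo).toNat + 1) := Nat.one_le_two_pow
      omega

lemma ncEval_child (n l0 l1 s1 : Int) (suf : List Int) (g : Int) :
    ncEval (ncChild n l0 l1 s1 suf g) =
      (if n - g = 0 then [[g]]
       else (number_combine (n - g) (max (l0 - 1) 1, l1 - 1) (g, s1)).map (fun c => c ++ [g])).map
        (fun c => c ++ suf) := by
  by_cases hg : g = n
  · simp [ncChild, hg, ncEval]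
  · have : ¬ (n - g = 0) := by omega
    simp [ncChild, hg, ncEval, this, Function.comp_def, List.append_assoc]

lemma pushed_eval (n l0 l1 s0 s1 : Int) (suf : List Int)
    (hg : 1 ≤ l0 ∧ l0 ≤ l1 ∧ 1 ≤ s0 ∧ s0 ≤ s1 ∧ s0 * l0 ≤ n ∧ n ≤ s1 * l1) :
    (((PySem.List.pyRange (max 1 s0) (min s1 (n - (l0 - 1) * s0) + 1) 1).map
        (ncChild n l0 l1 s1 suf)).map ncEval).flatten =
      (number_combine n (l0, l1) (s0, s1)).map (fun c => c ++ suf) := by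
  rw [number_combine]
  rw [dif_pos (by simpa using hg)]
  simp only [List.map_flatMap]
  rw [List.map_map, ← List.flatMap_def]
  conv_lhs => rw [← List.attach_map_subtype_val
    (PySem.List.pyRange (max 1 s0) (min s1 (n - (l0 - 1) * s0) + 1) 1)]
  rw [List.flatMap_map]
  apply List.flatMap_congr
  intro g _
  exact (ncEval_child n l0 l1 s1 suf g.1).trans rfl

lemma ncLoop_eval : ∀ (f : Nat) (st : List NCEntry), ncM st ≤ f →
    ncLoop f st = (st.map ncEval).flatten := by
  intro f
  induction f with
  | zero =>
      intro st h
      cases st with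
      | nil => rfl
      | cons e rest =>
          exfalso
          have := ncW_pos e
          simp [ncM] at h
          omega
  | succ f ih =>
      intro st h
      match st with
      | [] => rfl
      | NCEntry.yld t :: rest =>
          have hm : ncM rest ≤ f := by simp [ncM, ncW] at h ⊢; omega
          simp [ncLoop, ih rest hm, ncEval]
      | NCEntry.frame n l0 l1 s0 s1 suf :: rest =>
          have hmc : ncM (NCEntry.frame n l0 l1 s0 s1 suf :: rest) = 2 ^ (n.toNat + 1) + ncM rest := by
            simp [ncM, ncW]
          have hpos : (2:Nat) ≤ 2 ^ (n.toNat + 1) := by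
            calc (2:Nat) = 2 ^ 1 := rfl
            _ ≤ 2 ^ (n.toNat + 1) := Nat.pow_le_pow_right (by omega) (by omega)
          by_cases hg : 1 ≤ l0 ∧ l0 ≤ l1 ∧ 1 ≤ s0 ∧ s0 ≤ s1 ∧ s0 * l0 ≤ n ∧ n ≤ s1 * l1
          · have hn1 : 1 ≤ n := by
              have := mul_pos (show (0:Int) < s0 by omega) (show (0:Int) < l0 by omega)
              omega
            have hbound := sumW_bound n l0 l1 s1 suf
              ((min s1 (n - (l0 - 1) * s0) + 1) - max 1 s0).toNat (max 1 s0)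
              (min s1 (n - (l0 - 1) * s0) + 1) (by omega)
              (by
                have : 0 ≤ (l0 - 1) * s0 := mul_nonneg (by omega) (by omega)
                omega)
              rfl
            have hmono : 2 ^ ((n + 1 - max 1 s0).toNat + 1) ≤ 2 ^ (n.toNat + 1) :=
              Nat.pow_le_pow_right (by omega) (by omega)
            rw [ncLoop, if_pos hg, foldl_push]
            rw [ih _ (by rw [ncM_append]; omega)]
            simp only [List.map_append, List.flatten_append, List.map_cons, List.flatten_cons]
            rw [pushed_eval n l0 l1 s0 s1 suf hg]
            rfl
          · rw [ncLoop, if_neg hg]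
            rw [ih rest (by omega)]
            have : ncEval (NCEntry.frame n l0 l1 s0 s1 suf) = [] := by
              show (number_combine n (l0, l1) (s0, s1)).map (fun c => c ++ suf) = []
              rw [number_combine, dif_neg (by simpa using hg)]
              rfl
            simp [this]

-- ===== VERDICT (by name: the statement is the Claim_ definition above) =====
theorem number_combine_spec : Claim_equal_number_combine := by
  intro N L S _hD
  unfold Spec_number_combine number_combine_alt
  rw [ncLoop_eval _ _ (by simp [ncM, ncW])]
  simp [ncEval]
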